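-- pv_equiv track=rewrite | github.com/NativeMojo/django-mojo | mojo/helpers/content_guard/normalize.py | dedup_chars
-- ===== SOURCE A (Python) =====
-- def dedup_chars(text, max_run=2):
--     """Collapse repeated character runs to at most max_run length."""
--     if not text:
--         return text
--     result = [text[0]]
--     count = 1
--     for ch in text[1:]:
--         if ch == result[-1]:
--             count += 1
--             if count <= max_run:
--                 result.append(ch)
--         else:
--             count = 1
--             result.append(ch)
--     return "".join(result)
-- ===== SOURCE B (Python) =====
-- from itertools import groupby
--
-- def dedup_chars(text, max_run=2):
--     """Collapse repeated character runs to at most max_run length."""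
--     if not text:
--         return text
--     return "".join(ch * max(1, min(sum(1 for _ in grp), max_run))
--                    for ch, grp in groupby(text))
-- ===== Notes on version B (the rewrite author's own statement) =====
-- stated objective: idiomatic
-- what changed: Replaces A's manual last-char/counter loop with an itertools.groupby run decomposition that emits max(1, min(run_length, max_run)) copies of each run's character.
import Mathlib
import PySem

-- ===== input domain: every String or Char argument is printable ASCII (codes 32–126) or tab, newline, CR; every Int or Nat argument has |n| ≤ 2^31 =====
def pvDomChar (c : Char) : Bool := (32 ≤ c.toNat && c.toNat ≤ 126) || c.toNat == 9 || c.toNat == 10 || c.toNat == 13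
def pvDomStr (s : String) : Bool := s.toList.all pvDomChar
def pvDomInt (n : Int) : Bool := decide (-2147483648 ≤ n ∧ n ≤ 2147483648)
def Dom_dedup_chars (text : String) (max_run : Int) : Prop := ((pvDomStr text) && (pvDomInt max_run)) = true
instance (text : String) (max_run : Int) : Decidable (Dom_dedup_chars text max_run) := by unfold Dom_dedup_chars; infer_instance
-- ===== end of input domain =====

-- B replaces A's manual last-char/counter loop by an itertools.groupby run decomposition,
-- emitting max(1, min(run_length, max_run)) copies per run (idiomatic; same cost).

-- ===== PORT A =====
-- Literal transliteration of A: 'if not text' on a string = emptiness test; the loop over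
-- text[1:] carries state (result, count); result[-1] → getLast!.
def dedup_chars (text : String) (max_run : Int) : String :=
  if text.isEmpty then text
  else
    match text.toList with
    | [] => text
    | c :: rest =>
      let st := rest.foldl (fun (st : List Char × Int) ch =>
          if ch == st.1.getLast! then
            if st.2 + 1 ≤ max_run then (st.1 ++ [ch], st.2 + 1) else (st.1, st.2 + 1)
          else (st.1 ++ [ch], 1)) ([c], (1 : Int))
      String.mk st.1

-- ===== PORT B =====
-- itertools.groupby(text): the list of (char, run length) groups, left to right.
def runsOf : List Char → List (Char × Nat)
  | [] => []
  | c :: rest =>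
    match runsOf rest with
    | (c', n) :: t => if c = c' then (c, n + 1) :: t else (c, 1) :: (c', n) :: t
    | [] => [(c, 1)]

-- ch * max(1, min(n, max_run))
def emitRun (max_run : Int) (p : Char × Nat) : List Char :=
  List.replicate (max 1 (min (p.2 : Int) max_run)).toNat p.1

def dedup_chars_alt (text : String) (max_run : Int) : String :=
  if text.isEmpty then text
  else String.mk ((runsOf text.toList).flatMap (emitRun max_run))

-- ===== PRECONDITION & SPEC =====
def Spec_dedup_chars (text : String) (max_run : Int) (out : String) : Prop := out = dedup_chars_alt text max_run
instance (text : String) (max_run : Int) (out : String) : Decidable (Spec_dedup_chars text max_run out) := by unfold Spec_dedup_chars; infer_instance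

-- ===== CLAIM (what is proved, stated in full; the proofs are below) =====
def Claim_equal_dedup_chars : Prop := ∀ (text : String) (max_run : Int), Dom_dedup_chars text max_run → Spec_dedup_chars text max_run (dedup_chars text max_run)

-- ===== LEMMAS AND PROOFS =====

-- A's loop, recursively: remaining chars, last char of result, current count.
def procA (max_run : Int) : List Char → Char → Int → List Char
  | [], _, _ => []
  | ch :: rest, last, count =>
    if ch = last then
      if count + 1 ≤ max_run then ch :: procA max_run rest ch (count + 1)
      else procA max_run rest ch (count + 1)
    else ch :: procA max_run rest ch 1

def capRun (max_run : Int) (k : Nat) : Nat := (max 1 (min (k : Int) max_run)).toNat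

def mergeRun (c : Char) (k : Nat) : List (Char × Nat) → List (Char × Nat)
  | (c', n) :: t => if c = c' then (c, n + k) :: t else (c, k) :: (c', n) :: t
  | [] => [(c, k)]

theorem getLast_bang_of_getLast? (acc : List Char) (c : Char) (h : acc.getLast? = some c) :
    acc.getLast! = c := by
  cases acc with
  | nil => simp at h
  | cons a t =>
    simp [List.getLast!]
    rw [List.getLast?_eq_some_iff] at h
    obtain ⟨l, hl⟩ := h
    simp [hl]

theorem runsOf_cons (c : Char) (rest : List Char) :
    runsOf (c :: rest) = mergeRun c 1 (runsOf rest) := by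
  cases h : runsOf rest with
  | nil => simp [runsOf, mergeRun, h]
  | cons p t => cases p; simp [runsOf, mergeRun, h]

theorem mergeRun_mergeRun (c : Char) (k : Nat) (rs : List (Char × Nat)) :
    mergeRun c k (mergeRun c 1 rs) = mergeRun c (k + 1) rs := by
  cases rs with
  | nil => simp [mergeRun]; omega
  | cons p t =>
    cases p with
    | mk c' n =>
      by_cases h : c = c' <;> simp [mergeRun, h] <;> omega

theorem mergeRun_ne (c d : Char) (k : Nat) (rs : List (Char × Nat)) (h : c ≠ d) :
    mergeRun c k (mergeRun d 1 rs) = (c, k) :: mergeRun d 1 rs := by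
  cases rs with
  | nil => simp [mergeRun, h]
  | cons p t =>
    cases p with
    | mk c' n =>
      by_cases h' : d = c'
      · subst h'; simp [mergeRun, h]
      · simp [mergeRun, h', h]

theorem capRun_succ_le (max_run : Int) (k : Nat) (hk : 1 ≤ k)
    (hle : (k : Int) + 1 ≤ max_run) :
    capRun max_run (k + 1) = capRun max_run k + 1 := by
  unfold capRun; omega

theorem capRun_succ_gt (max_run : Int) (k : Nat) (hk : 1 ≤ k)
    (hle : ¬ ((k : Int) + 1 ≤ max_run)) :
    capRun max_run (k + 1) = capRun max_run k := by
  unfold capRun; omega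

theorem capRun_one (max_run : Int) : capRun max_run 1 = 1 := by
  unfold capRun; omega

-- The heart: A's run processing equals B's per-run emission.
theorem procA_eq_runs (max_run : Int) (cs : List Char) :
    ∀ (c : Char) (k : Nat), 1 ≤ k →
      List.replicate (capRun max_run k) c ++ procA max_run cs c (k : Int)
        = (mergeRun c k (runsOf cs)).flatMap (emitRun max_run) := by
  induction cs with
  | nil =>
    intro c k hk
    simp [procA, runsOf, mergeRun, emitRun, capRun]
  | cons d rest ih =>
    intro c k hk
    by_cases hdc : d = c
    · subst hdc
      rw [runsOf_cons, mergeRun_mergeRun]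
      have h1 : ((k : Int) + 1) = ((k + 1 : Nat) : Int) := by push_cast; ring
      by_cases hle : (k : Int) + 1 ≤ max_run
      · have := ih d (k + 1) (by omega)
        rw [procA, if_pos rfl, if_pos hle, h1, ← this,
            capRun_succ_le max_run k hk hle]
        simp [List.replicate_succ']
      · have := ih d (k + 1) (by omega)
        rw [procA, if_pos rfl, if_neg hle, h1, ← this,
            capRun_succ_gt max_run k hk hle]
    · rw [runsOf_cons, mergeRun_ne c d k _ (fun h => hdc h.symm)]
      have := ih d 1 le_rfl
      rw [capRun_one, Nat.cast_one] at this
      simp only [List.replicate_one, List.singleton_append] at this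
      rw [procA, if_neg hdc, List.flatMap_cons, ← this]
      simp [emitRun, capRun]

-- A's foldl with a nonempty accumulator appends exactly procA.
theorem foldA_eq (max_run : Int) (cs : List Char) :
    ∀ (acc : List Char) (k : Int) (c : Char), acc.getLast? = some c →
      (cs.foldl (fun (st : List Char × Int) ch =>
          if ch == st.1.getLast! then
            if st.2 + 1 ≤ max_run then (st.1 ++ [ch], st.2 + 1) else (st.1, st.2 + 1)
          else (st.1 ++ [ch], 1)) (acc, k)).1
        = acc ++ procA max_run cs c k := by
  induction cs with
  | nil => intro acc k c h; simp [procA]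
  | cons d rest ih =>
    intro acc k c h
    have hlast : acc.getLast! = c := getLast_bang_of_getLast? acc c h
    rw [List.foldl_cons]
    by_cases hdc : d = c
    · subst hdc
      simp only [hlast, beq_self_eq_true, if_true]
      by_cases hle : k + 1 ≤ max_run
      · rw [if_pos hle, ih (acc ++ [d]) (k + 1) d (by simp)]
        simp [procA, hle]
      · rw [if_neg hle, ih acc (k + 1) d h]
        simp [procA, hle]
    · have hb : (d == acc.getLast!) = false := by
        rw [hlast]; exact beq_eq_false_iff_ne.mpr hdc
      rw [hb]
      simp only [Bool.false_eq_true, if_false]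
      rw [ih (acc ++ [d]) 1 d (by simp)]
      simp [procA, hdc]

-- ===== VERDICT (by name: the statement is the Claim_ definition above) =====
theorem dedup_chars_spec : Claim_equal_dedup_chars := by
  intro text max_run _
  unfold Spec_dedup_chars dedup_chars dedup_chars_alt
  by_cases he : text.isEmpty
  · simp [he]
  · rw [if_neg he, if_neg he]
    cases hcs : text.toList with
    | nil =>
      exact absurd hcs (by simp_all [String.isEmpty_iff, String.toList_eq_nil_iff])
    | cons c rest =>
      simp only []
      rw [foldA_eq max_run rest [c] 1 c (by simp)]
      have := procA_eq_runs max_run rest c 1 le_rfl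
      rw [capRun_one, Nat.cast_one] at this
      simp only [List.replicate_one, List.singleton_append] at this
      rw [List.singleton_append, this, ← runsOf_cons]
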